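-- pv_equiv track=rewrite | github.com/J-mock/322-Final-Project | mysklearn/myutils.py | bin_nba_data
-- ===== SOURCE A (Python) =====
-- def bin_nba_data(data):
--     binned_data = []
--     num_cols = len(data[0])
--     cols = [list(col) for col in zip(*data)]
--     # Now have list of lists cols
--     cutoffs = []
--     num_vals = len(cols[0])
--     for col in cols:
--         cutoff = []
--         sorted_col = sorted(col)
--         # Value at index 1/3
--         pct_33 = sorted_col[int(num_vals * 1/3)]
--         # Value at index 2/3
--         pct_66 = sorted_col[int(num_vals * 2/3)]
--         cutoff.append(pct_33)
--         cutoff.append(pct_66)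
--         cutoffs.append(cutoff)
--
--     for cutoff, col in zip(cutoffs, cols):
--         for i, val in enumerate(col):
--             if val < cutoff[0]:
--                 col[i] = "bad"
--             elif val > cutoff[1]:
--                 col[i] = "good"
--             else:
--                 col[i] = "average"
--
--     binned_data = [list(row) for row in zip(*cols)]
--
--     return binned_data
-- ===== SOURCE B (Python) =====
-- def _kth(xs, k):
--     # k-th smallest (0-indexed): the least value v in xs with at least k+1 elements <= v
--     return min(v for v in xs if sum(x <= v for x in xs) > k)
--
--
-- def bin_nba_data(data):
--     m = min(len(row) for row in data)
--     cutoffs = []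
--     for j in range(m):
--         col = [row[j] for row in data]
--         n = len(col)
--         cutoffs.append((_kth(col, n // 3), _kth(col, 2 * n // 3)))
--     return [["bad" if row[j] < cutoffs[j][0]
--              else "good" if row[j] > cutoffs[j][1]
--              else "average"
--              for j in range(m)]
--             for row in data]
-- ===== Notes on version B (the rewrite author's own statement) =====
-- stated objective: alternative
-- what changed: B never transposes, sorts or mutates: it computes each tercile cutoff as an order statistic by counting comparisons (least value v with more than k elements <= v) and emits the labelled rows directly with a nested comprehension, instead of A's transpose / full sort per column / in-place relabel / transpose back.
import Mathlib
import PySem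

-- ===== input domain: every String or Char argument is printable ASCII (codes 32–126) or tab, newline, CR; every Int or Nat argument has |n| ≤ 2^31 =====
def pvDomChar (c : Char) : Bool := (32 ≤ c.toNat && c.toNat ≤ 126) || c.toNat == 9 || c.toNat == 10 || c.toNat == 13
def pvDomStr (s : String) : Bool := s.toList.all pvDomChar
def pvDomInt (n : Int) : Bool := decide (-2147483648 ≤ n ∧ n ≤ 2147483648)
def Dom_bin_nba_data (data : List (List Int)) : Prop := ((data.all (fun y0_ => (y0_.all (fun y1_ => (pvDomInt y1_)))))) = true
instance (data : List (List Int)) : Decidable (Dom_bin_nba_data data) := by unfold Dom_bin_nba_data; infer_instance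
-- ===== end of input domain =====

-- B re-implements the tercile binning without transposing or sorting: each cutoff is an
-- order statistic obtained by counting comparisons, and the labelled rows are emitted directly.
-- Same cost class in c and n up to the selection (B is quadratic per column, A sorts); objective: alternative.

-- ===== PORT A =====
-- zip(*rows) (and the final zip(*cols)): columns truncated at the shortest row
def pvT {α : Type} [Inhabited α] (rows : List (List α)) : List (List α) :=
  if h : rows ≠ [] ∧ rows.all (fun x => !x.isEmpty) then
    (rows.map (fun r => r.headI)) :: pvT (rows.map (fun r => r.tail))
  else []
termination_by rows.headI.length
decreasing_by
  rcases rows with _ | ⟨r, rs⟩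
  · simp at h
  · obtain ⟨-, hall⟩ := h
    have hr : r ≠ [] := by
      have := List.all_eq_true.mp hall r (by simp)
      simpa using this
    cases r with
    | nil => exact absurd rfl hr
    | cons a t => simp

-- int(num_vals * 1/3) / int(num_vals * 2/3): float truncation; exact as floor division
-- for the list lengths the domain admits.
def bin_nba_data (data : List (List Int)) : List (List String) :=
  let cols := pvT data
  let numVals : Int := PySem.List.len (cols.headI)
  let cutoffs : List (Int × Int) := cols.map (fun col =>
    let s := PySem.List.sorted col (fun x => x) false
    ((PySem.List.pyGet? s (PySem.Int.floordiv (numVals * 1) 3)).getD 0,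
     (PySem.List.pyGet? s (PySem.Int.floordiv (numVals * 2) 3)).getD 0))
  let newCols := (cutoffs.zip cols).map (fun p =>
    p.2.map (fun v => if v < p.1.1 then "bad" else if v > p.1.2 then "good" else "average"))
  pvT newCols

-- ===== PORT B =====
-- min(v for v in xs if sum(x <= v for x in xs) > k)
def pvKth (xs : List Int) (k : Int) : Int :=
  (PySem.List.min? (xs.filter (fun v => decide (k < ((xs.countP (fun x => decide (x ≤ v))) : Int))))
    (fun x => x)).getD 0

def bin_nba_data_alt (data : List (List Int)) : List (List String) :=
  let m : Int := (PySem.List.min? (data.map (fun r => PySem.List.len r)) (fun x => x)).getD 0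
  let cutoffs : List (Int × Int) := (PySem.List.pyRange 0 m 1).map (fun j =>
    let col := data.map (fun row => (PySem.List.pyGet? row j).getD 0)
    let n : Int := PySem.List.len col
    (pvKth col (PySem.Int.floordiv n 3), pvKth col (PySem.Int.floordiv (2 * n) 3)))
  data.map (fun row => (PySem.List.pyRange 0 m 1).map (fun j =>
    let v := (PySem.List.pyGet? row j).getD 0
    let c := (PySem.List.pyGet? cutoffs j).getD (0, 0)
    if v < c.1 then "bad" else if v > c.2 then "good" else "average"))

-- ===== PRECONDITION & SPEC =====
-- A raises IndexError on empty data (data[0]) and whenever some row is empty (zip(*data)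
-- yields no columns, so cols[0] fails); exactly those inputs are excluded.
def Pre_bin_nba_data (data : List (List Int)) : Prop :=
  data ≠ [] ∧ ∀ r ∈ data, r ≠ []
instance (data : List (List Int)) : Decidable (Pre_bin_nba_data data) := by
  unfold Pre_bin_nba_data; infer_instance

def pvWitness_bin_nba_data : List (List Int) := [[3, 10], [1, 20], [2, 30]]

def Spec_bin_nba_data (data : List (List Int)) (out : List (List String)) : Prop :=
  out = bin_nba_data_alt data
instance (data : List (List Int)) (out : List (List String)) : Decidable (Spec_bin_nba_data data out) := by
  unfold Spec_bin_nba_data; infer_instance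

-- ===== CLAIM (what is proved, stated in full; the proofs are below) =====
def Claim_equal_bin_nba_data : Prop :=
  ∀ (data : List (List Int)), Dom_bin_nba_data data → Pre_bin_nba_data data →
    Spec_bin_nba_data data (bin_nba_data data)

-- ===== LEMMAS AND PROOFS =====

-- minimum row length (the quantity both programs key their column range on)
def pvML {α : Type} (rows : List (List α)) : Nat := ((rows.map List.length).min?).getD 0

theorem pvML_spec {α : Type} (rows : List (List α)) (h : rows ≠ []) :
    pvML rows ∈ rows.map List.length ∧ ∀ b ∈ rows.map List.length, pvML rows ≤ b := by
  have hne : rows.map List.length ≠ [] := by simpa using h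
  cases hmin : (rows.map List.length).min? with
  | none => exact absurd (List.min?_eq_none_iff.mp hmin) hne
  | some m =>
    have := List.min?_eq_some_iff.mp hmin
    simpa [pvML, hmin] using this

theorem pvT_eq {α : Type} [Inhabited α] (rows : List (List α)) (h : rows ≠ []) :
    pvT rows = (List.range (pvML rows)).map
      (fun j => rows.map (fun r => r.getD j default)) := by
  induction rows using pvT.induct with
  | case1 rows hcond ih =>
    obtain ⟨-, hall⟩ := hcond
    have hall' : ∀ r ∈ rows, r ≠ [] := by
      intro r hr
      have := List.all_eq_true.mp hall r hr
      simpa using this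
    obtain ⟨hmem, hlb⟩ := pvML_spec rows h
    obtain ⟨r0, hr0, hlen0⟩ := List.mem_map.mp hmem
    have hpos : 1 ≤ pvML rows := by
      rw [← hlen0]
      have := hall' r0 hr0
      cases r0 with
      | nil => exact absurd rfl this
      | cons a t => simp
    have htne : rows.map (fun r => r.tail) ≠ [] := by
      intro hc; exact h (List.map_eq_nil_iff.mp hc)
    have hml' : pvML (rows.map (fun r => r.tail)) = pvML rows - 1 := by
      have : ((rows.map (fun r => r.tail)).map List.length).min? = some (pvML rows - 1) := by
        rw [List.min?_eq_some_iff]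
        constructor
        · rw [List.map_map]
          refine List.mem_map.mpr ⟨r0, hr0, ?_⟩
          simp [← hlen0]
        · rw [List.map_map]
          intro b hb
          obtain ⟨r, hr, hrb⟩ := List.mem_map.mp hb
          have := hlb r.length (List.mem_map.mpr ⟨r, hr, rfl⟩)
          simp only [Function.comp] at hrb
          rw [← hrb]
          simp [List.length_tail]
          omega
      rw [List.map_map] at this
      simp only [pvML, List.map_map, this, Option.getD_some]
    rw [pvT]
    rw [dif_pos ⟨h, hall⟩]
    rw [ih htne, hml']
    have hrange : List.range (pvML rows) = 0 :: (List.range (pvML rows - 1)).map Nat.succ := by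
      rw [← List.range_succ_eq_map]
      congr 1
      omega
    rw [hrange]
    simp only [List.map_cons, List.map_map]
    congr 1
    · apply List.map_congr_left
      intro r hr
      cases r with
      | nil => rfl
      | cons a t => rfl
    · apply List.map_congr_left
      intro j hj
      apply List.map_congr_left
      intro r hr
      show (r.tail).getD j default = r.getD j.succ default
      cases r with
      | nil => rfl
      | cons a t => rfl
  | case2 rows hcond =>
    by_cases h0 : rows = []
    · exact absurd h0 h
    · have : ∃ r ∈ rows, r = [] := by
        by_contra hc
        push Not at hc
        exact hcond ⟨h0, List.all_eq_true.mpr (fun r hr => by simpa using hc r hr)⟩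
      obtain ⟨r, hr, hrnil⟩ := this
      have : pvML rows = 0 := by
        obtain ⟨hmem, hlb⟩ := pvML_spec rows h0
        have := hlb r.length (List.mem_map.mpr ⟨r, hr, rfl⟩)
        simp [hrnil] at this
        omega
      rw [pvT, dif_neg hcond, this]
      rfl

-- counting selection = the k-th entry of the sorted column
theorem kth_eq (xs : List Int) (k : Nat) (hk : k < xs.length) :
    pvKth xs (k : Int) = (PySem.List.sorted xs (fun x => x) false).getD k 0 := by
  set s := PySem.List.sorted xs (fun x => x) false with hs
  have hperm : s.Perm xs := PySem.List.sorted_perm xs (fun x => x) false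
  have hlen : s.length = xs.length := hperm.length_eq
  have hks : k < s.length := by omega
  set v := s[k] with hv
  have hgetD : s.getD k 0 = v := List.getD_eq_getElem s 0 hks
  have hcount : ∀ w : Int, xs.countP (fun x => decide (x ≤ w)) = s.countP (fun x => decide (x ≤ w)) :=
    fun w => (hperm.countP_eq _).symm
  have hmono : ∀ p q : Nat, (hpq : p ≤ q) → (hq : q < s.length) → s[p]'(by omega) ≤ s[q] := by
    intro p q hpq hq
    exact PySem.List.sorted_id_getElem_mono xs hpq hq
  have hvmem : v ∈ xs := hperm.mem_iff.mp (List.getElem_mem hks)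
  have hcv : (k : Int) < (xs.countP (fun x => decide (x ≤ v)) : Int) := by
    rw [hcount]
    have h1 : (s.take (k+1)).countP (fun x => decide (x ≤ v)) = k + 1 := by
      rw [List.countP_eq_length.mpr, List.length_take]
      · omega
      · intro a ha
        obtain ⟨i, hi, hia⟩ := List.mem_take_iff_getElem.mp ha
        simp only [decide_eq_true_eq]
        rw [← hia]
        exact hmono i k (by omega) hks
    have hsp : s.countP (fun x => decide (x ≤ v)) =
        (s.take (k+1)).countP (fun x => decide (x ≤ v)) + (s.drop (k+1)).countP (fun x => decide (x ≤ v)) := by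
      conv_lhs => rw [← List.take_append_drop (k+1) s]
      rw [List.countP_append]
    rw [hsp, h1]
    push_cast
    omega
  have hvfil : v ∈ xs.filter (fun w => decide ((k:Int) < (xs.countP (fun x => decide (x ≤ w)) : Int))) :=
    List.mem_filter.mpr ⟨hvmem, by simpa using hcv⟩
  have hlbound : ∀ w ∈ xs.filter (fun w => decide ((k:Int) < (xs.countP (fun x => decide (x ≤ w)) : Int))), v ≤ w := by
    intro w hw
    obtain ⟨hwmem, hwc⟩ := List.mem_filter.mp hw
    simp only [decide_eq_true_eq] at hwc
    by_contra hlt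
    push Not at hlt
    have hcw : s.countP (fun x => decide (x ≤ w)) ≤ k := by
      have h2 : (s.drop k).countP (fun x => decide (x ≤ w)) = 0 := by
        rw [List.countP_eq_zero]
        intro a ha
        obtain ⟨i, hi, hia⟩ := List.mem_iff_getElem.mp ha
        have hkd : k + i < s.length := by
          rw [List.length_drop] at hi
          omega
        have hda : s[k + i]'hkd = a := by
          rw [← hia, List.getElem_drop]
        have hvk : v ≤ s[k + i]'hkd := hmono k (k+i) (by omega) hkd
        simp only [decide_eq_true_eq]
        rw [← hda]
        omega
      have hsp : s.countP (fun x => decide (x ≤ w)) =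
          (s.take k).countP (fun x => decide (x ≤ w)) + (s.drop k).countP (fun x => decide (x ≤ w)) := by
        conv_lhs => rw [← List.take_append_drop k s]
        rw [List.countP_append]
      have h3 := List.countP_le_length (p := fun x => decide (x ≤ w)) (l := s.take k)
      rw [List.length_take] at h3
      omega
    rw [hcount] at hwc
    omega
  unfold pvKth
  cases hmin : PySem.List.min? (xs.filter (fun w => decide ((k:Int) < (xs.countP (fun x => decide (x ≤ w)) : Int)))) (fun x => x) with
  | none =>
    rw [PySem.List.min?_eq_none_iff] at hmin
    rw [hmin] at hvfil
    simp at hvfil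
  | some mv =>
    have hmmem := PySem.List.min?_mem hmin
    have hmmin := PySem.List.min?_isMin hmin
    have : mv = v := le_antisymm (hmmin v hvfil) (hlbound mv hmmem)
    rw [Option.getD_some, this, hgetD]

theorem cast_foldl_min (x : Nat) (t : List Nat) :
    ((t.foldl min x : Nat) : Int) = t.foldl (fun (a : Int) (b : Nat) => min a (b : Int)) (x : Int) := by
  induction t generalizing x with
  | nil => rfl
  | cons a t ih => simp [List.foldl, ih, Nat.cast_min]

theorem minlen_int (data : List (List Int)) (h : data ≠ []) :
    PySem.List.min? (data.map (fun r => PySem.List.len r)) (fun x => x)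
      = some ((pvML data : Nat) : Int) := by
  cases data with
  | nil => exact absurd rfl h
  | cons r rs =>
    have h1 : (r :: rs).map (fun r => PySem.List.len r)
        = ((r.length : Int)) :: rs.map (fun x => ((x.length : Nat) : Int)) := by
      simp [PySem.List.len_eq]
    rw [h1, PySem.List.min?_id_cons]
    congr 1
    have h2 : pvML (r :: rs) = (rs.map List.length).foldl min r.length := by
      simp only [pvML, List.map_cons, List.min?_cons', Option.getD_some]
    rw [h2, cast_foldl_min, List.foldl_map, List.foldl_map]

theorem pvML_const {α : Type} (L : List (List α)) (n : Nat) (hne : L ≠ [])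
    (hlen : ∀ c ∈ L, c.length = n) : pvML L = n := by
  have : (L.map List.length).min? = some n := by
    rw [List.min?_eq_some_iff]
    cases L with
    | nil => exact absurd rfl hne
    | cons c cs =>
      constructor
      · exact List.mem_map.mpr ⟨c, by simp, hlen c (by simp)⟩
      · intro b hb
        obtain ⟨d, hd, hdb⟩ := List.mem_map.mp hb
        rw [← hdb, hlen d hd]
  simp [pvML, this]

theorem pvT_map_range {α : Type} [Inhabited α] (g : Nat → List α) (mm nn : Nat) (hm : 1 ≤ mm)
    (hg : ∀ j, (g j).length = nn) :
    pvT ((List.range mm).map g)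
      = (List.range nn).map (fun i => (List.range mm).map (fun j => (g j).getD i default)) := by
  have hne : (List.range mm).map g ≠ [] := by
    intro hc
    have := congrArg List.length hc
    simp at this
    omega
  rw [pvT_eq _ hne, pvML_const ((List.range mm).map g) nn hne
      (by intro c hc; obtain ⟨j, -, rfl⟩ := List.mem_map.mp hc; exact hg j)]
  simp only [List.map_map]
  rfl

theorem pyGet_map_range (f : Int → Int × Int) (mm j : Nat) (hj : j < mm) :
    (PySem.List.pyGet? ((List.range mm).map (f ∘ fun k : Nat => (k : Int))) ((j : Nat) : Int)).getD (0, 0)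
      = f (j : Int) := by
  rw [PySem.List.pyGet?_natCast]
  simp [hj]

theorem cut1_eq (col : List Int) (nn : Nat) (hcol : col.length = nn) (h1 : 1 ≤ nn) :
    (PySem.List.pyGet? (PySem.List.sorted col (fun x => x) false)
        (PySem.Int.floordiv ((nn : Int) * 1) 3)).getD 0
      = pvKth col (PySem.Int.floordiv (nn : Int) 3) := by
  have e1 : PySem.Int.floordiv ((nn : Int)) 3 = ((nn / 3 : Nat) : Int) := by
    exact_mod_cast PySem.Int.floordiv_natCast nn 3
  rw [mul_one, e1, kth_eq col (nn / 3) (by omega)]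
  rw [PySem.List.pyGet?_natCast, ← List.getD_eq_getElem?_getD]

theorem cut2_eq (col : List Int) (nn : Nat) (hcol : col.length = nn) (h1 : 1 ≤ nn) :
    (PySem.List.pyGet? (PySem.List.sorted col (fun x => x) false)
        (PySem.Int.floordiv ((nn : Int) * 2) 3)).getD 0
      = pvKth col (PySem.Int.floordiv (2 * (nn : Int)) 3) := by
  have e2 : PySem.Int.floordiv ((nn : Int) * 2) 3 = ((2 * nn / 3 : Nat) : Int) := by
    have h := PySem.Int.floordiv_natCast (2 * nn) 3
    rw [← h]
    push_cast
    ring_nf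
  have e2' : PySem.Int.floordiv (2 * (nn : Int)) 3 = ((2 * nn / 3 : Nat) : Int) := by
    have h := PySem.Int.floordiv_natCast (2 * nn) 3
    rw [← h]
    push_cast
    ring_nf
  have hlt2 : 2 * nn / 3 < nn := by omega
  rw [e2, e2', kth_eq col (2 * nn / 3) (by omega)]
  rw [PySem.List.pyGet?_natCast, ← List.getD_eq_getElem?_getD]

theorem main_eq (data : List (List Int)) (hne : data ≠ [])
    (hall : ∀ r ∈ data, r ≠ []) : bin_nba_data data = bin_nba_data_alt data := by
  have hBm := minlen_int data hne
  set n := data.length with hn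
  set m := pvML data with hm
  have hn1 : 1 ≤ n := List.length_pos_of_ne_nil hne
  have hm1 : 1 ≤ m := by
    obtain ⟨hmem, -⟩ := pvML_spec data hne
    obtain ⟨r, hr, hrl⟩ := List.mem_map.mp hmem
    have hrne := hall r hr
    cases r with
    | nil => exact absurd rfl hrne
    | cons a t =>
      rw [hm, ← hrl]
      simp
  have hk1 : n / 3 < n := by omega
  have hk2 : 2 * n / 3 < n := by omega
  have hrange0 : List.range m = 0 :: (List.range (m - 1)).map Nat.succ := by
    rw [← List.range_succ_eq_map]
    congr 1
    omega
  have hcols : pvT data = (List.range m).map (fun j => data.map (fun r => r.getD j 0)) :=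
    pvT_eq data hne
  -- unfold both programs
  show bin_nba_data data = bin_nba_data_alt data
  simp only [bin_nba_data, bin_nba_data_alt]
  rw [hcols, hBm, Option.getD_some, PySem.List.pyRange_zero_natCast]
  -- A's num_vals is the number of rows
  have hnum : PySem.List.len
      (((List.range m).map (fun j => data.map (fun r => r.getD j 0))).headI) = (n : Int) := by
    rw [hrange0]
    simp only [List.map_cons, List.headI_cons, PySem.List.len_eq, List.length_map]
    rw [hn]
  rw [hnum]
  -- fuse the maps
  rw [List.map_map, List.map_map, List.zip_map', List.map_map]
  -- pvT of the labelled columns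
  rw [pvT_map_range
      ((fun p : (Int × Int) × List Int =>
          List.map (fun v => if v < p.1.1 then "bad" else if v > p.1.2 then "good" else "average") p.2) ∘
        fun a =>
          (((fun col =>
                ((PySem.List.pyGet? (PySem.List.sorted col (fun x => x) false)
                    (PySem.Int.floordiv ((n : Int) * 1) 3)).getD 0,
                  (PySem.List.pyGet? (PySem.List.sorted col (fun x => x) false)
                    (PySem.Int.floordiv ((n : Int) * 2) 3)).getD 0)) ∘
              fun j => List.map (fun r => r.getD j 0) data) a,
            List.map (fun r => r.getD a 0) data))
      m n hm1
      (by intro j; simp [Function.comp, ← hn])]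
  have hcoleq : ∀ j : Nat,
      data.map (fun row => (PySem.List.pyGet? row ((j : Nat) : Int)).getD 0)
        = data.map (fun r => r.getD j 0) := by
    intro j
    apply List.map_congr_left
    intro r hr
    rw [PySem.List.pyGet?_natCast, ← List.getD_eq_getElem?_getD]
  apply List.ext_getElem
  · simp [← hn]
  intro i h1 h2
  have hi : i < n := by simpa using h1
  simp only [List.getElem_map, List.getElem_range]
  simp only [List.map_map]
  apply List.map_congr_left
  intro j hj
  have hjm : j < m := List.mem_range.mp hj
  dsimp only [Function.comp_apply]
  rw [pyGet_map_range _ m j hjm]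
  simp only [hcoleq j, PySem.List.len_eq, List.length_map, ← hn]
  simp only [cut1_eq (data.map (fun r => r.getD j 0)) n (by simp [← hn]) hn1,
      cut2_eq (data.map (fun r => r.getD j 0)) n (by simp [← hn]) hn1]
  rw [List.getD_eq_getElem _ _ (by simp [← hn]; omega)]
  simp only [List.getElem_map]
  rw [PySem.List.pyGet?_natCast, ← List.getD_eq_getElem?_getD]

-- ===== VERDICT (by name: the statement is the Claim_ definition above) =====
theorem bin_nba_data_spec : Claim_equal_bin_nba_data := by
  intro data hdom hpre
  obtain ⟨hne, hall⟩ := hpre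
  show bin_nba_data data = bin_nba_data_alt data
  exact main_eq data hne hall
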